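-- pv_equiv track=rewrite | github.com/desplega-ai/chat-py | packages/chat/src/chat/_remend.py | _count_unescaped
-- ===== SOURCE A (Python) =====
-- def _count_unescaped(text: str, char: str) -> int:
--     """Count occurrences of *char* outside fenced code blocks and escapes."""
--     in_fence = False
--     count = 0
--     i = 0
--     n = len(text)
--     while i < n:
--         # Check for a ``` fence
--         if text[i : i + 3] in ("```", "~~~"):
--             in_fence = not in_fence
--             i += 3
--             continue
--         if text[i] == "\\" and i + 1 < n:
--             i += 2
--             continue
--         if not in_fence and text[i] == char:
--             count += 1
--         i += 1
--     return count
-- ===== SOURCE B (Python) =====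
-- import re
--
-- _TOKEN = re.compile(r'```|~~~|\\[\s\S]|[\s\S]')
--
--
-- def _count_unescaped(text: str, char: str) -> int:
--     """Count occurrences of *char* outside fenced code blocks and escapes."""
--     in_fence = False
--     count = 0
--     for m in _TOKEN.finditer(text):
--         tok = m.group()
--         if tok == "```" or tok == "~~~":
--             in_fence = not in_fence
--         elif len(tok) == 2:
--             pass  # escape pair: ignored
--         elif not in_fence and tok == char:
--             count += 1
--     return count
-- ===== Notes on version B (the rewrite author's own statement) =====
-- stated objective: idiomatic
-- what changed: Replaced A's manual index/slice while-loop state machine by a regex tokenizer (fence / escape-pair / single char via re.finditer) followed by a plain loop over the token stream.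
import Mathlib
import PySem

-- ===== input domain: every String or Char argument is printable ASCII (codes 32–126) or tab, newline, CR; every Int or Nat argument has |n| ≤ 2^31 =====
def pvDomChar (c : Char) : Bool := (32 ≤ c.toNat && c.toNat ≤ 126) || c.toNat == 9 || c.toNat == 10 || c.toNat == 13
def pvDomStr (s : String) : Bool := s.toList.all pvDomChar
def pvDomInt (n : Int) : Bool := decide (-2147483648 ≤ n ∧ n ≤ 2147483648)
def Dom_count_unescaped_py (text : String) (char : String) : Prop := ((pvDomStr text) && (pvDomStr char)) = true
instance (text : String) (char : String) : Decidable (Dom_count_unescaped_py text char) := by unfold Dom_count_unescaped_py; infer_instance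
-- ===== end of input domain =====

-- B replaces A's manual index/slice state machine by a regex tokenizer (fence / escape-pair /
-- single char) and a plain loop over the token stream; objective: idiomatic, same cost.

-- ===== PORT A =====
-- A's while loop over index i, transcribed as recursion on the remaining suffix of the text
-- (text[i:i+3] = take 3 of the suffix; i += k = drop k).
def countALoop (char : String) (inFence : Bool) (count : Int) : List Char → Int
  | [] => count
  | c :: rs =>
    if (c :: rs).take 3 = ['`','`','`'] ∨ (c :: rs).take 3 = ['~','~','~'] then
      countALoop char (!inFence) count (rs.drop 2)
    else if c = '\\' ∧ rs ≠ [] then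
      countALoop char inFence count (rs.drop 1)
    else if !inFence ∧ String.ofList [c] = char then
      countALoop char inFence (count + 1) rs
    else
      countALoop char inFence count rs
  termination_by rest => rest.length
  decreasing_by all_goals (first | (simp; omega) | simp)

def count_unescaped_py (text : String) (char : String) : Int :=
  countALoop char false 0 text.toList

-- ===== PORT B =====
-- the token stream produced by the regex ```|~~~|\[\s\S]|[\s\S] (leftmost scan, branch priority)
inductive PvTok where
  | fence : PvTok
  | esc   : PvTok
  | one   : Char → PvTok
deriving DecidableEq, Repr

def tokenizeB : List Char → List PvTok
  | [] => []
  | c :: rs =>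
    if (c :: rs).take 3 = ['`','`','`'] ∨ (c :: rs).take 3 = ['~','~','~'] then
      PvTok.fence :: tokenizeB (rs.drop 2)
    else if c = '\\' ∧ rs ≠ [] then
      PvTok.esc :: tokenizeB (rs.drop 1)
    else
      PvTok.one c :: tokenizeB rs
  termination_by rest => rest.length
  decreasing_by all_goals (first | (simp; omega) | simp)

def stepB (char : String) (st : Bool × Int) (t : PvTok) : Bool × Int :=
  match t with
  | PvTok.fence => (!st.1, st.2)
  | PvTok.esc => st
  | PvTok.one c => if !st.1 ∧ String.ofList [c] = char then (st.1, st.2 + 1) else st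

def count_unescaped_py_alt (text : String) (char : String) : Int :=
  ((tokenizeB text.toList).foldl (stepB char) (false, 0)).2

-- ===== PRECONDITION & SPEC =====
def Spec_count_unescaped_py (text : String) (char : String) (out : Int) : Prop := out = count_unescaped_py_alt text char
instance (text : String) (char : String) (out : Int) : Decidable (Spec_count_unescaped_py text char out) := by unfold Spec_count_unescaped_py; infer_instance

-- ===== CLAIM (what is proved, stated in full; the proofs are below) =====
def Claim_equal_count_unescaped_py : Prop := ∀ (text : String) (char : String), Dom_count_unescaped_py text char → Spec_count_unescaped_py text char (count_unescaped_py text char)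

-- ===== LEMMAS AND PROOFS =====
theorem countALoop_eq_fold (char : String) :
    ∀ (rest : List Char) (f : Bool) (k : Int),
      countALoop char f k rest = ((tokenizeB rest).foldl (stepB char) (f, k)).2 := by
  intro rest
  induction rest using tokenizeB.induct with
  | case1 => intro f k; simp [countALoop, tokenizeB]
  | case2 c rs h ih =>
    intro f k
    rw [countALoop, tokenizeB]
    simp only [if_pos h, List.foldl_cons, stepB]
    exact ih (!f) k
  | case3 c rs h1 h2 ih =>
    intro f k
    rw [countALoop, tokenizeB]
    simp only [if_neg h1, if_pos h2, List.foldl_cons, stepB]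
    exact ih f k
  | case4 c rs h1 h2 ih =>
    intro f k
    rw [countALoop, tokenizeB]
    simp only [if_neg h1, if_neg h2, List.foldl_cons, stepB]
    by_cases h3 : !f ∧ String.ofList [c] = char
    · simp only [if_pos h3]; exact ih f (k + 1)
    · simp only [if_neg h3]; exact ih f k

-- ===== VERDICT (by name: the statement is the Claim_ definition above) =====
theorem count_unescaped_py_spec : Claim_equal_count_unescaped_py := by
  intro text char _
  unfold Spec_count_unescaped_py count_unescaped_py count_unescaped_py_alt
  exact countALoop_eq_fold char text.toList false 0
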